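-- pv_equiv track=rewrite | github.com/Asma-zubair/Advent_of_Code_2024 | Day10_problem/part1.py | solve
-- ===== SOURCE A (Python) =====
-- from collections import deque
--
-- def solve(grid):
--     rows, cols = len(grid), len(grid[0])
--     directions = [(1,0), (-1,0), (0,1), (0,-1)]
--
--     def bfs(sr, sc):
--         queue = deque([(sr, sc)])
--         visited = set([(sr, sc)])
--         reachable_nines = set()
--
--         while queue:
--             r, c = queue.popleft()
--             if grid[r][c] == 9:
--                 reachable_nines.add((r, c))
--                 continue
--
--             for dr, dc in directions:
--                 nr, nc = r + dr, c + dc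
--                 if 0 <= nr < rows and 0 <= nc < cols:
--                     if (nr, nc) not in visited and grid[nr][nc] == grid[r][c] + 1:
--                         visited.add((nr, nc))
--                         queue.append((nr, nc))
--
--         return len(reachable_nines)
--
--     total_score = 0
--     for r in range(rows):
--         for c in range(cols):
--             if grid[r][c] == 0:
--                 total_score += bfs(r, c)
--
--     return total_score
-- ===== SOURCE B (Python) =====
-- def solve(grid):
--     rows, cols = len(grid), len(grid[0])
--     total = 0
--     for r in range(rows):
--         for c in range(cols):
--             if grid[r][c] == 0:
--                 cur = {(r, c)}
--                 for h in range(9):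
--                     nxt = set()
--                     for (cr, cc) in cur:
--                         for nr, nc in ((cr + 1, cc), (cr - 1, cc), (cr, cc + 1), (cr, cc - 1)):
--                             if 0 <= nr < rows and 0 <= nc < cols and grid[nr][nc] == h + 1:
--                                 nxt.add((nr, nc))
--                     cur = nxt
--                 total += len(cur)
--     return total
-- ===== Notes on version B (the rewrite author's own statement) =====
-- stated objective: simpler
-- what changed: B replaces A's per-trailhead BFS with an explicit deque and visited set by a height-synchronized frontier sweep: starting from the 0-cell it iterates h=0..8, each round replacing the frontier by the set of in-bounds neighbours of value h+1, and adds the size of the final (height-9) frontier; no queue, no visited set, no early-exit branch for 9-cells.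
import Mathlib
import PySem

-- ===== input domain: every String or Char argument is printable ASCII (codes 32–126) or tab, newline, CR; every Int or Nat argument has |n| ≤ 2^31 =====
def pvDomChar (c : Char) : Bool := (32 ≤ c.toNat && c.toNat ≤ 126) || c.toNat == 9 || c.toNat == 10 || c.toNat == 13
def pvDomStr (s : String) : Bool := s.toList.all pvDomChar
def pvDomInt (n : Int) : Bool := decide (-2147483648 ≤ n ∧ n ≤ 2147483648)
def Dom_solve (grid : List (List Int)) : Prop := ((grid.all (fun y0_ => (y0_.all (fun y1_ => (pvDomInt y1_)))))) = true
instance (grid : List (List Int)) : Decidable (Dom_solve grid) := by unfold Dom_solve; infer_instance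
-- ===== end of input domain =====

-- B replaces A's per-trailhead BFS (deque + visited set) by a height-synchronized frontier
-- sweep (h = 0..8, frontier := neighbours of value h+1); objective: simpler, same cost.


-- grid[r][c] as both Pythons read it (both only index after the same 0 ≤ r < rows, 0 ≤ c < cols check;
-- the .getD defaults are never reached on inputs satisfying Pre_solve)
def pvVal (grid : List (List Int)) (p : Int × Int) : Int :=
  (PySem.List.pyGet? ((PySem.List.pyGet? grid p.1).getD []) p.2).getD 0

-- ===== PORT A =====
def pvDirs : List (Int × Int) := [(1, 0), (-1, 0), (0, 1), (0, -1)]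

-- body of A's 'for dr, dc in directions' loop: maybe enqueue + mark visited
def pvBfsStep (grid : List (List Int)) (rows cols : Int) (p : Int × Int)
    (st : List (Int × Int) × PySem.Set (Int × Int)) (d : Int × Int) :
    List (Int × Int) × PySem.Set (Int × Int) :=
  let q := (p.1 + d.1, p.2 + d.2)
  if 0 ≤ q.1 ∧ q.1 < rows ∧ 0 ≤ q.2 ∧ q.2 < cols then
    if q ∉ st.2 ∧ pvVal grid q = pvVal grid p + 1 then
      (st.1 ++ [q], PySem.Set.add st.2 q)
    else st
  else st

-- A's 'while queue' loop; fuel rows*cols+1 strictly dominates the number of iterations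
-- (each iteration pops one cell, and every enqueued cell enters visited, which holds
-- distinct in-bounds cells), so the loop always ends on the [] case, as in Python.
def pvBfsLoop (grid : List (List Int)) (rows cols : Int) :
    Nat → List (Int × Int) → PySem.Set (Int × Int) → PySem.Set (Int × Int) →
    PySem.Set (Int × Int)
  | 0, _, _, nines => nines
  | _ + 1, [], _, nines => nines
  | fuel + 1, p :: rest, visited, nines =>
    if pvVal grid p = 9 then
      pvBfsLoop grid rows cols fuel rest visited (PySem.Set.add nines p)
    else
      let st := pvDirs.foldl (pvBfsStep grid rows cols p) (rest, visited)
      pvBfsLoop grid rows cols fuel st.1 st.2 nines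

def pvBfs (grid : List (List Int)) (rows cols : Int) (s : Int × Int) : Int :=
  ((pvBfsLoop grid rows cols (rows.toNat * cols.toNat + 1)
      [s] (PySem.Set.ofList [s]) PySem.Set.empty).length : Int)

def solve (grid : List (List Int)) : Int :=
  let rows : Int := grid.length
  let cols : Int := ((PySem.List.pyGet? grid 0).getD []).length
  (PySem.List.pyRange 0 rows 1).foldl (fun total r =>
    (PySem.List.pyRange 0 cols 1).foldl (fun total c =>
      if pvVal grid (r, c) = 0 then total + pvBfs grid rows cols (r, c) else total) total) 0

-- ===== PORT B =====
def pvNbrs (p : Int × Int) : List (Int × Int) :=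
  [(p.1 + 1, p.2), (p.1 - 1, p.2), (p.1, p.2 + 1), (p.1, p.2 - 1)]

-- B's frontier-step: one round of B's inner double loop (body of 'for h in range(9)')
def pvStepB (grid : List (List Int)) (rows cols : Int)
    (cur : PySem.Set (Int × Int)) (h : Int) : PySem.Set (Int × Int) :=
  cur.foldl (fun nxt p =>
    (pvNbrs p).foldl (fun nxt q =>
      if (0 ≤ q.1 ∧ q.1 < rows ∧ 0 ≤ q.2 ∧ q.2 < cols) ∧ pvVal grid q = h + 1 then
        PySem.Set.add nxt q
      else nxt) nxt) PySem.Set.empty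

-- B's per-trailhead frontier sweep: for h in range(9): cur := {in-bounds neighbours of cur of value h+1}
def pvScoreB (grid : List (List Int)) (rows cols : Int) (s : Int × Int) : Int :=
  (((PySem.List.pyRange 0 9 1).foldl (pvStepB grid rows cols)
    (PySem.Set.ofList [s])).length : Int)

def solve_alt (grid : List (List Int)) : Int :=
  let rows : Int := grid.length
  let cols : Int := ((PySem.List.pyGet? grid 0).getD []).length
  (PySem.List.pyRange 0 rows 1).foldl (fun total r =>
    (PySem.List.pyRange 0 cols 1).foldl (fun total c =>
      if pvVal grid (r, c) = 0 then total + pvScoreB grid rows cols (r, c) else total) total) 0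

-- ===== PRECONDITION & SPEC =====
-- Pre_ excludes exactly the inputs where Python A raises IndexError: the empty grid
-- (grid[0]) and grids with a row shorter than the first row (grid[nr][nc] with nc < cols).
def Pre_solve (grid : List (List Int)) : Prop :=
  grid ≠ [] ∧ ∀ row ∈ grid, (grid.headD []).length ≤ row.length
instance (grid : List (List Int)) : Decidable (Pre_solve grid) := by
  unfold Pre_solve; infer_instance

def pvWitness_solve : List (List Int) := [[0, 1], [9, 8]]

def Spec_solve (grid : List (List Int)) (out : Int) : Prop := out = solve_alt grid
instance (grid : List (List Int)) (out : Int) : Decidable (Spec_solve grid out) := by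
  unfold Spec_solve; infer_instance

-- ===== CLAIM (what is proved, stated in full; the proofs are below) =====
def Claim_equal_solve : Prop :=
  ∀ (grid : List (List Int)), Dom_solve grid → Pre_solve grid → Spec_solve grid (solve grid)

-- ===== LEMMAS AND PROOFS =====

-- in-bounds predicate both programs test
def pvInb (rows cols : Int) (p : Int × Int) : Prop :=
  0 ≤ p.1 ∧ p.1 < rows ∧ 0 ≤ p.2 ∧ p.2 < cols

-- the height-k frontier: cells reachable from s in exactly k value-incrementing steps
def pvRF (grid : List (List Int)) (rows cols : Int) (s : Int × Int) :
    Nat → Int × Int → Prop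
  | 0, p => p = s
  | k + 1, p => pvInb rows cols p ∧ pvVal grid p = (k : Int) + 1 ∧
      ∃ q, pvRF grid rows cols s k q ∧ p ∈ pvNbrs q

lemma pvRF_val {grid : List (List Int)} {rows cols : Int} {s : Int × Int}
    (h0 : pvVal grid s = 0) :
    ∀ (k : Nat) (p : Int × Int), pvRF grid rows cols s k p → pvVal grid p = (k : Int) := by
  intro k
  induction k with
  | zero => intro p hp; cases hp; simpa using h0
  | succ k ih => intro p hp; obtain ⟨-, hv, -⟩ := hp; push_cast; omega

lemma pvMem_nbrs_iff (p q : Int × Int) :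
    q ∈ pvNbrs p ↔ ∃ d ∈ pvDirs, q = (p.1 + d.1, p.2 + d.2) := by
  obtain ⟨q1, q2⟩ := q; obtain ⟨p1, p2⟩ := p
  simp only [pvNbrs, pvDirs, List.mem_cons, List.not_mem_nil, or_false, Prod.mk.injEq,
    exists_eq_or_imp, exists_eq_left]
  omega

-- characterization of A's inner 'for dr, dc' fold
lemma pvStepFold (grid : List (List Int)) (rows cols : Int) (p : Int × Int) :
    ∀ (ds : List (Int × Int)) (rest : List (Int × Int)) (visited : PySem.Set (Int × Int)),
      visited.Nodup →
      ∃ new : List (Int × Int),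
        ds.foldl (pvBfsStep grid rows cols p) (rest, visited) = (rest ++ new, visited ++ new) ∧
        (visited ++ new).Nodup ∧
        (∀ y, y ∈ visited ++ new ↔ y ∈ visited ∨
          ∃ d ∈ ds, y = (p.1 + d.1, p.2 + d.2) ∧ pvInb rows cols y ∧
            pvVal grid y = pvVal grid p + 1) := by
  intro ds
  induction ds with
  | nil =>
    intro rest visited hnd
    exact ⟨[], by simp, by simpa using hnd, by simp⟩
  | cons d ds ih =>
    intro rest visited hnd
    rw [List.foldl_cons]
    by_cases hb : 0 ≤ p.1 + d.1 ∧ p.1 + d.1 < rows ∧ 0 ≤ p.2 + d.2 ∧ p.2 + d.2 < cols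
    · by_cases hc : (p.1 + d.1, p.2 + d.2) ∉ visited ∧
          pvVal grid (p.1 + d.1, p.2 + d.2) = pvVal grid p + 1
      · have hstep : pvBfsStep grid rows cols p (rest, visited) d =
            (rest ++ [(p.1 + d.1, p.2 + d.2)], visited ++ [(p.1 + d.1, p.2 + d.2)]) := by
          simp [pvBfsStep, hb, hc]
        rw [hstep]
        have hnd' : (visited ++ [(p.1 + d.1, p.2 + d.2)]).Nodup := by
          rw [← PySem.Set.add_of_not_mem hc.1]
          apply PySem.Set.nodup_add
          exact hnd
        obtain ⟨new, heq, hnd2, hmem⟩ := ih _ _ hnd'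
        refine ⟨(p.1 + d.1, p.2 + d.2) :: new, ?_, ?_, ?_⟩
        · rw [heq]; simp
        · simpa using hnd2
        · intro y
          have := hmem y
          simp only [List.append_assoc, List.singleton_append] at this ⊢
          rw [this]
          simp only [List.mem_append, List.mem_cons, List.not_mem_nil, or_false]
          constructor
          · rintro ((h | h) | h)
            · exact Or.inl h
            · exact Or.inr ⟨d, by simp, h, by rw [h]; exact hb, by rw [h]; exact hc.2⟩
            · obtain ⟨d', hd', h⟩ := h; exact Or.inr ⟨d', by simp [hd'], h⟩
          · rintro (h | ⟨d', hd', h⟩)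
            · exact Or.inl (Or.inl h)
            · rcases hd' with rfl | hd'
              · exact Or.inl (Or.inr h.1)
              · exact Or.inr ⟨d', hd', h⟩
      · have hstep : pvBfsStep grid rows cols p (rest, visited) d = (rest, visited) := by
          simp only [pvBfsStep, if_pos hb]
          rw [if_neg hc]
        rw [hstep]
        obtain ⟨new, heq, hnd2, hmem⟩ := ih rest visited hnd
        refine ⟨new, heq, hnd2, ?_⟩
        intro y
        rw [hmem y]
        constructor
        · rintro (h | ⟨d', hd', h⟩)
          · exact Or.inl h
          · exact Or.inr ⟨d', by simp [hd'], h⟩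
        · rintro (h | ⟨d', hd', h⟩)
          · exact Or.inl h
          · rcases List.mem_cons.1 hd' with rfl | hd'
            · -- condition failed: y = q, inb, val ⇒ q ∈ visited
              rcases h with ⟨rfl, hinb, hval⟩
              rcases not_and_or.1 hc with hmemv | hval'
              · exact Or.inl (not_not.1 hmemv)
              · exact absurd hval hval'
            · exact Or.inr ⟨d', hd', h⟩
    · have hstep : pvBfsStep grid rows cols p (rest, visited) d = (rest, visited) := by
        simp only [pvBfsStep, if_neg hb]
      rw [hstep]
      obtain ⟨new, heq, hnd2, hmem⟩ := ih rest visited hnd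
      refine ⟨new, heq, hnd2, ?_⟩
      intro y
      rw [hmem y]
      constructor
      · rintro (h | ⟨d', hd', h⟩)
        · exact Or.inl h
        · exact Or.inr ⟨d', by simp [hd'], h⟩
      · rintro (h | ⟨d', hd', h⟩)
        · exact Or.inl h
        · rcases List.mem_cons.1 hd' with rfl | hd'
          · rcases h with ⟨rfl, hinb, hval⟩; exact absurd hinb hb
          · exact Or.inr ⟨d', hd', h⟩

lemma pvCardBound (rows cols : Int) (V : List (Int × Int)) (hnd : V.Nodup)
    (hin : ∀ p ∈ V, pvInb rows cols p) : V.length ≤ rows.toNat * cols.toNat := by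
  have hsub : V ⊆ (List.range rows.toNat ×ˢ List.range cols.toNat).map
      (fun ij => ((ij.1 : Int), (ij.2 : Int))) := by
    intro x hx
    obtain ⟨h1, h2, h3, h4⟩ := hin x hx
    simp only [List.mem_map, Prod.exists]
    refine ⟨x.1.toNat, x.2.toNat, ?_, ?_⟩
    · simp only [List.mem_product, List.mem_range]
      exact ⟨by omega, by omega⟩
    · obtain ⟨a, b⟩ := x; simp at h1 h3 ⊢; omega
  have hall : ((List.range rows.toNat ×ˢ List.range cols.toNat).map
      (fun ij => ((ij.1 : Int), (ij.2 : Int)))).Nodup := by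
    refine List.Nodup.map ?_ ((List.nodup_range).product (List.nodup_range))
    intro a b hab
    simp only [Prod.mk.injEq] at hab
    exact Prod.ext (by exact_mod_cast hab.1) (by exact_mod_cast hab.2)
  calc V.length ≤ _ := (hnd.subperm hsub).length_le
    _ = rows.toNat * cols.toNat := by simp [List.length_product]

-- main BFS invariant: the loop returns exactly the 9-valued cells of a closed,
-- reachability-sound superset of visited
lemma pvBfsMain (grid : List (List Int)) (rows cols : Int) (s : Int × Int)
    (h0 : pvVal grid s = 0) :
    ∀ (fuel : Nat) (Q : List (Int × Int)) (V N : PySem.Set (Int × Int)),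
      V.Nodup → N.Nodup → Q.Nodup →
      (∀ p ∈ Q, p ∈ V) →
      (∀ p ∈ V, pvInb rows cols p) →
      (∀ p ∈ V, ∃ k ≤ 9, pvRF grid rows cols s k p) →
      (∀ p ∈ N, pvVal grid p = 9 ∧ p ∈ V ∧ p ∉ Q) →
      (∀ p ∈ V, p ∉ Q → (pvVal grid p = 9 → p ∈ N) ∧
        (pvVal grid p ≠ 9 → ∀ q ∈ pvNbrs p, pvInb rows cols q →
          pvVal grid q = pvVal grid p + 1 → q ∈ V)) →
      (rows.toNat * cols.toNat - V.length) + Q.length < fuel →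
      ∃ W : PySem.Set (Int × Int),
        (∀ p ∈ V, p ∈ W) ∧
        (∀ p ∈ W, ∃ k ≤ 9, pvRF grid rows cols s k p) ∧
        (∀ p ∈ W, pvVal grid p ≠ 9 → ∀ q ∈ pvNbrs p, pvInb rows cols q →
          pvVal grid q = pvVal grid p + 1 → q ∈ W) ∧
        (pvBfsLoop grid rows cols fuel Q V N).Nodup ∧
        (∀ p, p ∈ pvBfsLoop grid rows cols fuel Q V N ↔ p ∈ W ∧ pvVal grid p = 9) := by
  intro fuel
  induction fuel with
  | zero =>
    intro Q V N _ _ _ _ _ _ _ _ hfuel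
    exact absurd hfuel (by omega)
  | succ fuel ih =>
    intro Q V N hV hN hQnd hQV hVin hVreach hNinv hProc hfuel
    cases Q with
    | nil =>
      refine ⟨V, fun p hp => hp, hVreach, ?_, hN, ?_⟩
      · intro p hp hp9 q hq hqin hqv
        exact (hProc p hp (List.not_mem_nil)).2 hp9 q hq hqin hqv
      · intro p
        show p ∈ N ↔ _
        constructor
        · intro hp
          obtain ⟨h9, hpV, -⟩ := hNinv p hp
          exact ⟨hpV, h9⟩
        · rintro ⟨hpV, h9⟩
          exact (hProc p hpV (List.not_mem_nil)).1 h9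
    | cons p rest =>
      have hpV : p ∈ V := hQV p List.mem_cons_self
      have hprest : p ∉ rest := (List.nodup_cons.1 hQnd).1
      have hrestnd : rest.Nodup := (List.nodup_cons.1 hQnd).2
      by_cases h9 : pvVal grid p = 9
      · have hloop : pvBfsLoop grid rows cols (fuel + 1) (p :: rest) V N =
            pvBfsLoop grid rows cols fuel rest V (PySem.Set.add N p) := by
          simp only [pvBfsLoop, if_pos h9]
        rw [hloop]
        refine ih rest V (PySem.Set.add N p) hV
          (by apply PySem.Set.nodup_add; exact hN) hrestnd
          (fun x hx => hQV x (List.mem_cons_of_mem _ hx)) hVin hVreach ?_ ?_ ?_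
        · intro x hx
          rcases (PySem.Set.mem_add _ _ _).1 hx with hx | rfl
          · obtain ⟨a, b, c⟩ := hNinv x hx
            exact ⟨a, b, fun hr => c (List.mem_cons_of_mem _ hr)⟩
          · exact ⟨h9, hpV, hprest⟩
        · intro x hxV hxrest
          by_cases hxp : x = p
          · subst hxp
            exact ⟨fun _ => (PySem.Set.mem_add _ _ _).2 (Or.inr rfl),
              fun hne => absurd h9 hne⟩
          · have hxQ : x ∉ p :: rest := by
              simp [List.mem_cons, hxp, hxrest]
            obtain ⟨c1, c2⟩ := hProc x hxV hxQ
            exact ⟨fun hv => (PySem.Set.mem_add _ _ _).2 (Or.inl (c1 hv)), c2⟩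
        · simp only [List.length_cons] at hfuel
          omega
      · obtain ⟨new, heq, hnd2, hmem⟩ := pvStepFold grid rows cols p pvDirs rest V hV
        have hloop : pvBfsLoop grid rows cols (fuel + 1) (p :: rest) V N =
            pvBfsLoop grid rows cols fuel (rest ++ new) (V ++ new) N := by
          simp only [pvBfsLoop, if_neg h9, heq]
        rw [hloop]
        have hdisj : ∀ q ∈ new, q ∉ V := by
          intro q hq hqV
          exact (List.nodup_append.1 hnd2).2.2 q hqV q hq rfl
        have hmem' : ∀ q ∈ new, q ∈ pvNbrs p ∧ pvInb rows cols q ∧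
            pvVal grid q = pvVal grid p + 1 := by
          intro q hq
          rcases (hmem q).1 (List.mem_append_right _ hq) with hqv | ⟨d, hd, hqe, hin, hval⟩
          · exact absurd hqv (hdisj q hq)
          · exact ⟨(pvMem_nbrs_iff p q).2 ⟨d, hd, hqe⟩, hin, hval⟩
        have hVin' : ∀ x ∈ V ++ new, pvInb rows cols x := by
          intro x hx
          rcases List.mem_append.1 hx with hx | hx
          · exact hVin x hx
          · exact (hmem' x hx).2.1
        have hQnd' : (rest ++ new).Nodup := by
          rw [List.nodup_append]
          refine ⟨hrestnd, (List.nodup_append.1 hnd2).2.1, ?_⟩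
          intro x hx y hy hxy
          subst hxy
          exact hdisj x hy (hQV x (List.mem_cons_of_mem _ hx))
        have hQV' : ∀ x ∈ rest ++ new, x ∈ V ++ new := by
          intro x hx
          rcases List.mem_append.1 hx with hx | hx
          · exact List.mem_append_left _ (hQV x (List.mem_cons_of_mem _ hx))
          · exact List.mem_append_right _ hx
        have hreach' : ∀ x ∈ V ++ new, ∃ k ≤ 9, pvRF grid rows cols s k x := by
          intro x hx
          rcases List.mem_append.1 hx with hx | hx
          · exact hVreach x hx
          · obtain ⟨hnb, hin, hval⟩ := hmem' x hx
            obtain ⟨k, hk9, hRF⟩ := hVreach p hpV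
            have hvp : pvVal grid p = (k : Int) := pvRF_val h0 k p hRF
            have hk8 : k ≤ 8 := by
              rcases Nat.lt_or_ge k 9 with h | h
              · omega
              · exfalso; apply h9; rw [hvp]; omega
            exact ⟨k + 1, by omega, ⟨hin, by omega, p, hRF, hnb⟩⟩
        have hNinv' : ∀ x ∈ N, pvVal grid x = 9 ∧ x ∈ V ++ new ∧ x ∉ rest ++ new := by
          intro x hx
          obtain ⟨a, b, c⟩ := hNinv x hx
          refine ⟨a, List.mem_append_left _ b, fun hr => ?_⟩
          rcases List.mem_append.1 hr with hr | hr
          · exact c (List.mem_cons_of_mem _ hr)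
          · exact hdisj x hr b
        have hProc' : ∀ x ∈ V ++ new, x ∉ rest ++ new →
            (pvVal grid x = 9 → x ∈ N) ∧
            (pvVal grid x ≠ 9 → ∀ q ∈ pvNbrs x, pvInb rows cols q →
              pvVal grid q = pvVal grid x + 1 → q ∈ V ++ new) := by
          intro x hxV' hxQ'
          have hxnew : x ∉ new := fun hx => hxQ' (List.mem_append_right _ hx)
          have hxV : x ∈ V := by
            rcases List.mem_append.1 hxV' with hx | hx
            · exact hx
            · exact absurd hx hxnew
          by_cases hxp : x = p
          · subst hxp
            refine ⟨fun hv => absurd hv h9, fun _ q hq hqin hqv => ?_⟩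
            obtain ⟨d, hd, hqe⟩ := (pvMem_nbrs_iff x q).1 hq
            exact (hmem q).2 (Or.inr ⟨d, hd, hqe, hqin, hqv⟩)
          · have hxQ : x ∉ p :: rest := by
              intro hx
              rcases List.mem_cons.1 hx with rfl | hx
              · exact hxp rfl
              · exact hxQ' (List.mem_append_left _ hx)
            obtain ⟨c1, c2⟩ := hProc x hxV hxQ
            exact ⟨c1, fun hne q hq hqin hqv =>
              List.mem_append_left _ (c2 hne q hq hqin hqv)⟩
        have hfuel' : rows.toNat * cols.toNat - (V ++ new).length + (rest ++ new).length < fuel := by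
          have hb : (V ++ new).length ≤ rows.toNat * cols.toNat :=
            pvCardBound rows cols (V ++ new) hnd2 hVin'
          simp only [List.length_append, List.length_cons] at hb hfuel ⊢
          omega
        obtain ⟨W, w1, w2, w3, w4, w5⟩ := ih (rest ++ new) (V ++ new) N hnd2 hN
          hQnd' hQV' hVin' hreach' hNinv' hProc' hfuel'
        exact ⟨W, fun x hx => w1 x (List.mem_append_left _ hx), w2, w3, w4, w5⟩

-- B's inner fold over the 4 neighbours of one frontier cell
lemma pvFrontierInner (grid : List (List Int)) (rows cols : Int) (h : Int) :
    ∀ (qs : List (Int × Int)) (acc : PySem.Set (Int × Int)), acc.Nodup →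
      (qs.foldl (fun nxt q =>
        if (0 ≤ q.1 ∧ q.1 < rows ∧ 0 ≤ q.2 ∧ q.2 < cols) ∧ pvVal grid q = h + 1 then
          PySem.Set.add nxt q
        else nxt) acc).Nodup ∧
      ∀ y, y ∈ qs.foldl (fun nxt q =>
        if (0 ≤ q.1 ∧ q.1 < rows ∧ 0 ≤ q.2 ∧ q.2 < cols) ∧ pvVal grid q = h + 1 then
          PySem.Set.add nxt q
        else nxt) acc ↔
        y ∈ acc ∨ (y ∈ qs ∧ pvInb rows cols y ∧ pvVal grid y = h + 1) := by
  intro qs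
  induction qs with
  | nil => intro acc hnd; exact ⟨hnd, by simp⟩
  | cons q qs ih =>
    intro acc hnd
    rw [List.foldl_cons]
    by_cases hc : (0 ≤ q.1 ∧ q.1 < rows ∧ 0 ≤ q.2 ∧ q.2 < cols) ∧ pvVal grid q = h + 1
    · rw [if_pos hc]
      obtain ⟨h1, h2⟩ := ih (PySem.Set.add acc q) (by apply PySem.Set.nodup_add; exact hnd)
      refine ⟨h1, fun y => ?_⟩
      rw [h2 y, PySem.Set.mem_add]
      constructor
      · rintro ((hy | rfl) | ⟨hy1, hy2⟩)
        · exact Or.inl hy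
        · exact Or.inr ⟨List.mem_cons_self, hc.1, hc.2⟩
        · exact Or.inr ⟨List.mem_cons_of_mem _ hy1, hy2⟩
      · rintro (hy | ⟨hy1, hy2⟩)
        · exact Or.inl (Or.inl hy)
        · rcases List.mem_cons.1 hy1 with rfl | hy1
          · exact Or.inl (Or.inr rfl)
          · exact Or.inr ⟨hy1, hy2⟩
    · rw [if_neg hc]
      obtain ⟨h1, h2⟩ := ih acc hnd
      refine ⟨h1, fun y => ?_⟩
      rw [h2 y]
      constructor
      · rintro (hy | ⟨hy1, hy2⟩)
        · exact Or.inl hy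
        · exact Or.inr ⟨List.mem_cons_of_mem _ hy1, hy2⟩
      · rintro (hy | ⟨hy1, hy2⟩)
        · exact Or.inl hy
        · rcases List.mem_cons.1 hy1 with rfl | hy1
          · exact absurd ⟨hy2.1, hy2.2⟩ hc
          · exact Or.inr ⟨hy1, hy2⟩

-- B's inner double fold builds exactly the next frontier
lemma pvFrontierStep (grid : List (List Int)) (rows cols : Int) (h : Int) :
    ∀ (cur : List (Int × Int)) (acc : PySem.Set (Int × Int)), acc.Nodup →
      (cur.foldl (fun nxt p =>
        (pvNbrs p).foldl (fun nxt q =>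
          if (0 ≤ q.1 ∧ q.1 < rows ∧ 0 ≤ q.2 ∧ q.2 < cols) ∧ pvVal grid q = h + 1 then
            PySem.Set.add nxt q
          else nxt) nxt) acc).Nodup ∧
      ∀ y, y ∈ cur.foldl (fun nxt p =>
        (pvNbrs p).foldl (fun nxt q =>
          if (0 ≤ q.1 ∧ q.1 < rows ∧ 0 ≤ q.2 ∧ q.2 < cols) ∧ pvVal grid q = h + 1 then
            PySem.Set.add nxt q
          else nxt) nxt) acc ↔
        y ∈ acc ∨ ∃ p ∈ cur, y ∈ pvNbrs p ∧ pvInb rows cols y ∧ pvVal grid y = h + 1 := by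
  intro cur
  induction cur with
  | nil => intro acc hnd; exact ⟨hnd, by simp⟩
  | cons p cur ih =>
    intro acc hnd
    rw [List.foldl_cons]
    obtain ⟨h1, h2⟩ := pvFrontierInner grid rows cols h (pvNbrs p) acc hnd
    obtain ⟨h3, h4⟩ := ih _ h1
    refine ⟨h3, fun y => ?_⟩
    rw [h4 y, h2 y]
    constructor
    · rintro ((hy | ⟨hy1, hy2⟩) | ⟨p', hp', hy⟩)
      · exact Or.inl hy
      · exact Or.inr ⟨p, List.mem_cons_self, hy1, hy2⟩
      · exact Or.inr ⟨p', List.mem_cons_of_mem _ hp', hy⟩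
    · rintro (hy | ⟨p', hp', hy⟩)
      · exact Or.inl (Or.inl hy)
      · rcases List.mem_cons.1 hp' with rfl | hp'
        · exact Or.inl (Or.inr hy)
        · exact Or.inr ⟨p', hp', hy⟩

-- one B round from a frontier set
lemma pvStepB_spec (grid : List (List Int)) (rows cols : Int) (h : Int)
    (cur : PySem.Set (Int × Int)) :
    (pvStepB grid rows cols cur h).Nodup ∧
    ∀ y, y ∈ pvStepB grid rows cols cur h ↔
      ∃ p ∈ cur, y ∈ pvNbrs p ∧ pvInb rows cols y ∧ pvVal grid y = h + 1 := by
  obtain ⟨a, b⟩ := pvFrontierStep grid rows cols h cur PySem.Set.empty List.nodup_nil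
  refine ⟨a, fun y => ?_⟩
  show y ∈ cur.foldl _ PySem.Set.empty ↔ _
  rw [b y]
  simp [PySem.Set.empty]

-- B's sweep after n rounds computes the height-n frontier
lemma pvChain (grid : List (List Int)) (rows cols : Int) (s : Int × Int) :
    ∀ n : Nat,
      (((List.range n).map (fun k : Nat => (k : Int))).foldl (pvStepB grid rows cols)
        (PySem.Set.ofList [s])).Nodup ∧
      ∀ y, y ∈ ((List.range n).map (fun k : Nat => (k : Int))).foldl
          (pvStepB grid rows cols) (PySem.Set.ofList [s]) ↔
        pvRF grid rows cols s n y := by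
  intro n
  induction n with
  | zero =>
    refine ⟨by simp [PySem.Set.nodup_ofList], fun y => ?_⟩
    show y ∈ PySem.Set.ofList [s] ↔ pvRF grid rows cols s 0 y
    rw [PySem.Set.mem_ofList]
    simp [pvRF]
  | succ n ih =>
    obtain ⟨h1, h2⟩ := ih
    have hsplit : (List.range (n + 1)).map (fun k : Nat => (k : Int)) =
        (List.range n).map (fun k : Nat => (k : Int)) ++ [(n : Int)] := by
      rw [List.range_succ, List.map_append]; simp
    rw [hsplit, List.foldl_append, List.foldl_cons, List.foldl_nil]
    obtain ⟨h3, h4⟩ := pvStepB_spec grid rows cols (n : Int)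
      (((List.range n).map (fun k : Nat => (k : Int))).foldl (pvStepB grid rows cols)
        (PySem.Set.ofList [s]))
    refine ⟨h3, fun y => ?_⟩
    rw [h4 y]
    constructor
    · rintro ⟨p, hp, hy1, hy2, hy3⟩
      exact ⟨hy2, hy3, p, (h2 p).1 hp, hy1⟩
    · rintro ⟨hy2, hy3, p, hp, hy1⟩
      exact ⟨p, (h2 p).2 hp, hy1, hy2, hy3⟩

-- B's h = 0..8 sweep computes the height-9 frontier
lemma pvScoreB_frontier (grid : List (List Int)) (rows cols : Int) (s : Int × Int) :
    ∃ F : PySem.Set (Int × Int), F.Nodup ∧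
      (∀ y, y ∈ F ↔ pvRF grid rows cols s 9 y) ∧
      pvScoreB grid rows cols s = (F.length : Int) := by
  have hrange : PySem.List.pyRange 0 9 1 = (List.range 9).map (fun k : Nat => (k : Int)) := by
    decide
  obtain ⟨h1, h2⟩ := pvChain grid rows cols s 9
  refine ⟨_, h1, h2, ?_⟩
  rw [pvScoreB, hrange]

-- per-trailhead agreement
lemma pvCellEq (grid : List (List Int)) (rows cols : Int) (s : Int × Int)
    (hin : pvInb rows cols s) (h0 : pvVal grid s = 0) :
    pvBfs grid rows cols s = pvScoreB grid rows cols s := by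
  have hofl : PySem.Set.ofList [s] = [s] := rfl
  have hR1 : 1 ≤ rows.toNat := by obtain ⟨a, b, c, d⟩ := hin; omega
  have hC1 : 1 ≤ cols.toNat := by obtain ⟨a, b, c, d⟩ := hin; omega
  have hRC : 1 ≤ rows.toNat * cols.toNat := by
    have := Nat.mul_le_mul hR1 hC1; simpa using this
  obtain ⟨W, hVW, hWreach, hWclosed, hRnd, hRmem⟩ :=
    pvBfsMain grid rows cols s h0 (rows.toNat * cols.toNat + 1) [s]
      (PySem.Set.ofList [s]) PySem.Set.empty
      (by rw [hofl]; exact List.nodup_singleton s)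
      List.nodup_nil
      (List.nodup_singleton s)
      (by intro p hp; rw [hofl]; exact hp)
      (by intro p hp; rw [hofl] at hp; simp at hp; subst hp; exact hin)
      (by intro p hp; rw [hofl] at hp; simp at hp; subst hp
          exact ⟨0, by omega, rfl⟩)
      (by intro p hp; exact absurd hp (List.not_mem_nil))
      (by intro p hp hpn; rw [hofl] at hp; exact absurd hp hpn)
      (by rw [hofl]; simp; omega)
  have hWof : ∀ k, k ≤ 9 → ∀ y, pvRF grid rows cols s k y → y ∈ W := by
    intro k
    induction k with
    | zero =>
      intro _ y hy
      have hys : y = s := hy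
      subst hys
      exact hVW y (by rw [hofl]; exact List.mem_singleton_self y)
    | succ k ihk =>
      intro hk y hy
      obtain ⟨hin', hval, q, hq, hnb⟩ := hy
      have hqW : q ∈ W := ihk (by omega) q hq
      have hvq : pvVal grid q = (k : Int) := pvRF_val h0 k q hq
      refine hWclosed q hqW (by rw [hvq]; omega) y hnb hin' ?_
      rw [hvq, hval]
  have hmemRF : ∀ y,
      y ∈ pvBfsLoop grid rows cols (rows.toNat * cols.toNat + 1) [s]
        (PySem.Set.ofList [s]) PySem.Set.empty ↔ pvRF grid rows cols s 9 y := by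
    intro y
    rw [hRmem y]
    constructor
    · rintro ⟨hyW, hy9⟩
      obtain ⟨k, hk, hRF⟩ := hWreach y hyW
      have hvy : pvVal grid y = (k : Int) := pvRF_val h0 k y hRF
      have hk9 : k = 9 := by omega
      subst hk9
      exact hRF
    · intro hRF
      refine ⟨hWof 9 le_rfl y hRF, ?_⟩
      have := pvRF_val h0 9 y hRF
      simpa using this
  obtain ⟨F, hFnd, hFmem, hFeq⟩ := pvScoreB_frontier grid rows cols s
  have hperm : (pvBfsLoop grid rows cols (rows.toNat * cols.toNat + 1) [s]
      (PySem.Set.ofList [s]) PySem.Set.empty).Perm F :=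
    (List.perm_ext_iff_of_nodup hRnd hFnd).2
      (fun a => (hmemRF a).trans ((hFmem a).symm))
  rw [pvBfs, hFeq, hperm.length_eq]

-- ===== VERDICT (by name: the statement is the Claim_ definition above) =====
theorem solve_spec : Claim_equal_solve := by
  intro grid _ _
  unfold Spec_solve solve solve_alt
  apply PySem.List.foldl_congr_mem
  intro total r hr
  apply PySem.List.foldl_congr_mem
  intro tot c hc
  rw [PySem.List.mem_pyRange_one] at hr hc
  by_cases h0 : pvVal grid (r, c) = 0
  · rw [if_pos h0, if_pos h0,
      pvCellEq grid _ _ (r, c) ⟨hr.1, hr.2, hc.1, hc.2⟩ h0]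
  · rw [if_neg h0, if_neg h0]
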